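-- pv_equiv track=rewrite | github.com/jazzm0/hackerrank | picking_cards.py | solve
-- ===== SOURCE A (Python) =====
-- def solve(c):
--     mod = 10 ** 9 + 7
--     c = sorted(c)
--     result = 1
--     card_count = 0
--     for card in c:
--         if card_count < card:
--             return 0
--
--         card_count += 1
--         result *= card_count - card
--
--     return result % mod
-- ===== SOURCE B (Python) =====
-- def solve(c):
--     mod = 10 ** 9 + 7
--     cards = list(c)
--     result = 1
--     while cards:
--         k = len(cards)
--         m = max(cards)
--         if m > k - 1:
--             return 0
--         t = cards.count(m)
--         for j in range(k - t + 1, k + 1):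
--             result *= j - m
--         cards = [x for x in cards if x != m]
--     return result % mod
-- ===== Notes on version B (the rewrite author's own statement) =====
-- stated objective: alternative
-- what changed: B never sorts: it repeatedly selects the maximum of the remaining cards, consumes all its copies as one block (multiplying the block's rank factors) and filters them out, a selection-by-extraction loop instead of A's sort-then-scan over positions.
import Mathlib
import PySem

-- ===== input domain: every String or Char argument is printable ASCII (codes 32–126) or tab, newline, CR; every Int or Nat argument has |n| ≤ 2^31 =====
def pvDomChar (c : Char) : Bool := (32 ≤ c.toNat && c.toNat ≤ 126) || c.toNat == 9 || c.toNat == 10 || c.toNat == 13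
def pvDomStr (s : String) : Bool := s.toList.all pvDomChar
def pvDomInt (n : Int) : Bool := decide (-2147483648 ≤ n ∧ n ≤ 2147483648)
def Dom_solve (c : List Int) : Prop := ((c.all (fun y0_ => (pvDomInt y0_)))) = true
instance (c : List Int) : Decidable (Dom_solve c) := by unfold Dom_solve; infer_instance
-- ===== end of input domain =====

-- B replaces A's sort-then-scan with a selection loop (repeatedly extract the maximum
-- remaining card); this file proves the two return the same value on every input.

-- ===== PORT A =====
def solveGo : List Int → Int → Int → Int
  | [], _, result => PySem.Int.mod result (10 ^ 9 + 7)
  | card :: rest, card_count, result =>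
      if card_count < card then 0
      else solveGo rest (card_count + 1) (result * (card_count + 1 - card))

def solve (c : List Int) : Int :=
  solveGo (PySem.List.sorted c (fun x => x) false) 0 1

-- ===== PORT B =====
-- termination helper for solveAltGo (cited by its decreasing_by)
theorem countP_attach' (l : List Int) (p : Int → Bool) :
    List.countP (fun (x : {x // x ∈ l}) => p ↑x) l.attach = List.countP p l := by
  exact List.countP_attach

-- 'cards.count(m)' is PySem.List.count; the filter comprehension keeps x ≠ m.
def solveAltGo (cards : List Int) (result : Int) : Int :=
  match h : PySem.List.max? cards (fun x => x) with
  | none => PySem.Int.mod result (10 ^ 9 + 7)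
  | some m =>
      if m > (cards.length : Int) - 1 then 0
      else
        let k : Int := cards.length
        let t : Int := PySem.List.count cards m
        solveAltGo (cards.filter (fun x => !(x == m)))
          ((PySem.List.pyRange (k - t + 1) (k + 1) 1).foldl (fun r j => r * (j - m)) result)
termination_by cards.length
decreasing_by
  have hm := PySem.List.max?_mem h
  have hx : ∃ x ∈ cards, ¬ ((fun x => !(x == m)) x = true) := ⟨m, hm, by simp⟩
  have hlt : (cards.filter (fun x => !(x == m))).length < cards.length :=
    List.length_filter_lt_length_iff_exists.mpr hx
  simp only [List.length_unattach, ← List.countP_eq_length_filter]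
  rw [countP_attach' cards (fun x => !(x == m)), List.countP_eq_length_filter]
  exact hlt

def solve_alt (c : List Int) : Int := solveAltGo c 1

-- ===== PRECONDITION & SPEC =====
def Spec_solve (c : List Int) (out : Int) : Prop := out = solve_alt c
instance (c : List Int) (out : Int) : Decidable (Spec_solve c out) := by unfold Spec_solve; infer_instance

-- ===== CLAIM (what is proved, stated in full; the proofs are below) =====
def Claim_equal_solve : Prop := ∀ (c : List Int), Dom_solve c → Spec_solve c (solve c)

-- ===== LEMMAS AND PROOFS =====

-- the closed form both loops are reduced to: the feasibility check and the raw product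
def chk : List Int → Int → Bool
  | [], _ => true
  | x :: xs, cc => !decide (cc < x) && chk xs (cc + 1)

def prodF : List Int → Int → Int → Int
  | [], _, r => r
  | x :: xs, cc, r => prodF xs (cc + 1) (r * (cc + 1 - x))

theorem solveGo_closed : ∀ (s : List Int) (cc r : Int),
    solveGo s cc r = if chk s cc then PySem.Int.mod (prodF s cc r) (10 ^ 9 + 7) else 0 := by
  intro s
  induction s with
  | nil => intro cc r; simp [solveGo, chk, prodF]
  | cons x xs ih =>
      intro cc r
      by_cases hx : cc < x
      · simp [solveGo, chk, hx]
      · simp [solveGo, chk, prodF, hx, ih]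

theorem prodF_mul : ∀ (s : List Int) (cc r a : Int),
    prodF s cc (r * a) = prodF s cc r * a := by
  intro s
  induction s with
  | nil => intro cc r a; rfl
  | cons x xs ih =>
      intro cc r a
      simp only [prodF, mul_right_comm r a (cc + 1 - x), ih]

-- list facts about filtering out a value: length, replicate form, permutation
theorem filter_ne_length (l : List Int) (m : Int) :
    (l.filter (fun x => !(x == m))).length = l.length - l.count m := by
  have hp := (l.filter_append_perm (· == m)).length_eq
  rw [List.length_append] at hp
  have : (l.filter (· == m)).length = l.count m := by rw [List.filter_beq]; simp
  omega

theorem filter_ne_append_replicate_perm (l : List Int) (m : Int) :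
    ((l.filter (fun x => !(x == m))) ++ List.replicate (l.count m) m).Perm l := by
  have h := l.filter_append_perm (fun x => !(x == m))
  rw [show (fun x => !!(x == m)) = (fun x => x == m) from by funext x; simp] at h
  rw [show l.filter (fun x => x == m) = List.replicate (l.count m) m from by
    simpa using (List.filter_beq (l := l) (a := m))] at h
  exact h

theorem prodF_zero : ∀ (s : List Int) (cc : Int), prodF s cc 0 = 0 := by
  intro s
  induction s with
  | nil => intro cc; rfl
  | cons x xs ih => intro cc; simp only [prodF, zero_mul, ih]

theorem prodF_factor : ∀ (s : List Int) (cc a : Int), prodF s cc a = prodF s cc 1 * a := by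
  intro s cc a
  have := prodF_mul s cc 1 a
  rwa [one_mul] at this

theorem prodF_append : ∀ (xs ys : List Int) (cc r : Int),
    prodF (xs ++ ys) cc r = prodF ys (cc + (xs.length : Int)) (prodF xs cc r) := by
  intro xs
  induction xs with
  | nil => intro ys cc r; simp [prodF]
  | cons x t ih =>
      intro ys cc r
      simp only [List.cons_append, prodF, ih, List.length_cons]
      push_cast
      ring_nf

theorem chk_append : ∀ (xs ys : List Int) (cc : Int),
    chk (xs ++ ys) cc = (chk xs cc && chk ys (cc + (xs.length : Int))) := by
  intro xs
  induction xs with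
  | nil => intro ys cc; simp [chk]
  | cons x t ih =>
      intro ys cc
      simp only [List.cons_append, chk, ih, List.length_cons, Bool.and_assoc]
      push_cast
      ring_nf

theorem chk_replicate_true (m : Int) : ∀ (n : Nat) (d : Int), m ≤ d →
    chk (List.replicate n m) d = true := by
  intro n
  induction n with
  | zero => intro d _; rfl
  | succ k ih =>
      intro d hd
      simp only [List.replicate_succ, chk, ih (d + 1) (by omega),
        decide_eq_false (by omega : ¬ d < m)]
      rfl

theorem chk_replicate (m d : Int) : ∀ (n : Nat), n ≠ 0 →
    chk (List.replicate n m) d = decide (m ≤ d) := by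
  intro n hn
  obtain ⟨k, rfl⟩ : ∃ k, n = k + 1 := ⟨n - 1, by omega⟩
  by_cases hd : m ≤ d
  · rw [chk_replicate_true m (k + 1) d hd, decide_eq_true hd]
  · simp only [List.replicate_succ, chk, decide_eq_true (by omega : d < m),
      decide_eq_false hd]
    rfl

theorem range_prodF (m : Int) : ∀ (t : Nat) (d r : Int),
    (PySem.List.pyRange (d + 1) (d + (t : Int) + 1) 1).foldl (fun a j => a * (j - m)) r
      = prodF (List.replicate t m) d r := by
  intro t
  induction t with
  | zero =>
      intro d r
      rw [PySem.List.pyRange_one_eq_nil (by push_cast; omega)]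
      rfl
  | succ k ih =>
      intro d r
      rw [PySem.List.pyRange_one_cons (by push_cast; omega)]
      simp only [List.foldl_cons, List.replicate_succ, prodF]
      push_cast
      rw [show d + ((k : Int) + 1) + 1 = d + 1 + (k : Int) + 1 from by ring]
      exact ih (d + 1) (r * (d + 1 - m))

theorem prodF_replicate_eq_zero (m : Int) : ∀ (t : Nat) (d r : Int),
    d < m → m ≤ d + (t : Int) → prodF (List.replicate t m) d r = 0 := by
  intro t
  induction t with
  | zero =>
      intro d r h1 h2
      exact absurd h2 (by push_cast; omega)
  | succ k ih =>
      intro d r h1 h2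
      simp only [List.replicate_succ, prodF]
      by_cases hm : m = d + 1
      · rw [show r * (d + 1 - m) = 0 from by rw [hm]; ring]
        exact prodF_zero ..
      · exact ih (d + 1) _ (by omega) (by push_cast at h2 ⊢; omega)

-- sorting groups all copies of the maximum at the end
theorem sorted_decomp (cards : List Int) (m : Int)
    (h : PySem.List.max? cards (fun x => x) = some m) :
    PySem.List.sorted cards (fun x => x) false
      = PySem.List.sorted (cards.filter (fun x => !(x == m))) (fun x => x) false
        ++ List.replicate (cards.count m) m := by
  have hm : m ∈ cards := PySem.List.max?_mem h
  apply PySem.List.sorted_id_eq_of_perm_of_pairwise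
  · exact (List.Perm.append_right _ (PySem.List.sorted_perm ..)).trans
      (filter_ne_append_replicate_perm cards m)
  · apply List.pairwise_append.mpr
    refine ⟨?_, ?_, ?_⟩
    · simpa using PySem.List.sorted_pairwise (cards.filter (fun x => !(x == m))) (fun x => x)
    · exact List.pairwise_replicate.mpr (Or.inr le_rfl)
    · intro a ha b hb
      rw [List.eq_of_mem_replicate hb]
      have haf : a ∈ cards.filter (fun x => !(x == m)) := (PySem.List.mem_sorted ..).mp ha
      exact PySem.List.max?_isMax h a (List.mem_of_mem_filter haf)

theorem solveAltGo_closed : ∀ (n : Nat) (cards : List Int), cards.length = n → ∀ (r : Int),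
    solveAltGo cards r
      = if chk (PySem.List.sorted cards (fun x => x) false) 0
        then PySem.Int.mod (prodF (PySem.List.sorted cards (fun x => x) false) 0 r) (10 ^ 9 + 7)
        else 0 := by
  intro n
  induction n using Nat.strong_induction_on with
  | _ n ih =>
      intro cards hlen r
      rw [solveAltGo]
      split
      next h =>
        have hnil : cards = [] := (PySem.List.max?_eq_none_iff ..).mp h
        subst hnil
        simp [PySem.List.sorted, chk, prodF]
      next m h =>
        have hm : m ∈ cards := PySem.List.max?_mem h
        have hcnt : 0 < cards.count m := List.count_pos_iff.mpr hm
        have hcle : cards.count m ≤ cards.length := List.count_le_length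
        have hflen : (cards.filter (fun x => !(x == m))).length = cards.length - cards.count m :=
          filter_ne_length cards m
        have hslen : ((PySem.List.sorted (cards.filter (fun x => !(x == m))) (fun x => x) false).length : Int)
            = (cards.length : Int) - (cards.count m : Int) := by
          rw [PySem.List.length_sorted, hflen]
          omega
        rw [sorted_decomp cards m h, chk_append,
          chk_replicate m _ (cards.count m) (by omega)]
        by_cases hbig : m > (cards.length : Int) - 1
        · rw [if_pos hbig,
            decide_eq_false (by rw [hslen]; omega :
              ¬ m ≤ 0 + ((PySem.List.sorted (cards.filter (fun x => !(x == m))) (fun x => x) false).length : Int))]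
          simp
        · rw [if_neg hbig]
          show solveAltGo (cards.filter (fun x => !(x == m)))
              ((PySem.List.pyRange ((cards.length : Int) - (PySem.List.count cards m : Int) + 1)
                ((cards.length : Int) + 1) 1).foldl (fun a j => a * (j - m)) r) = _
          have hr : (PySem.List.pyRange ((cards.length : Int) - (PySem.List.count cards m : Int) + 1)
                ((cards.length : Int) + 1) 1).foldl (fun a j => a * (j - m)) r
              = prodF (List.replicate (cards.count m) m)
                  ((cards.length : Int) - (cards.count m : Int)) r := by
            have hth := range_prodF m (cards.count m)
              ((cards.length : Int) - (cards.count m : Int)) r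
            rw [show ((cards.length : Int) - (cards.count m : Int)) + ((cards.count m : Nat) : Int) + 1
                = (cards.length : Int) + 1 from by ring] at hth
            rw [PySem.List.count_eq]
            exact hth
          rw [hr, ih (cards.length - cards.count m) (by omega) _ hflen, prodF_append]
          by_cases hc : chk (PySem.List.sorted (cards.filter (fun x => !(x == m))) (fun x => x) false) 0
          · simp only [hc, Bool.true_and, if_true]
            by_cases hmle : m ≤ 0 + ((PySem.List.sorted (cards.filter (fun x => !(x == m))) (fun x => x) false).length : Int)
            · rw [decide_eq_true hmle, if_pos rfl]
              congr 1
              rw [hslen]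
              rw [prodF_factor _ 0 (prodF (List.replicate (cards.count m) m) ((cards.length : Int) - (cards.count m : Int)) r),
                prodF_factor (List.replicate (cards.count m) m) _ r,
                prodF_factor (List.replicate (cards.count m) m) _ (prodF _ 0 r),
                prodF_factor _ 0 r]
              ring_nf
            · rw [decide_eq_false hmle]
              simp only [Bool.false_eq_true, if_false]
              have hz : prodF (List.replicate (cards.count m) m)
                  ((cards.length : Int) - (cards.count m : Int)) r = 0 :=
                prodF_replicate_eq_zero m (cards.count m) _ r
                  (by rw [hslen] at hmle; omega) (by omega)
              rw [hz, prodF_zero]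
              decide
          · simp [hc]

-- ===== VERDICT (by name: the statement is the Claim_ definition above) =====
theorem solve_spec : Claim_equal_solve := by
  intro c _
  unfold Spec_solve solve solve_alt
  rw [solveGo_closed, solveAltGo_closed c.length c rfl 1]
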